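-- pv_equiv track=rewrite | github.com/frombread/Algorithm | 프로그래머스/1/42748. K번째수/K번째수.py | solution
-- ===== SOURCE A (Python) =====
-- def solution(array, commands):
--     answer = []
--     for i in commands:
--         list_1= []
--         list_1 = array[i[0]-1:i[1]]
--         list_1.sort()
--         answer.append(list_1[i[2]-1])
--     return answer
-- ===== SOURCE B (Python) =====
-- def _insort(top, x):
--     for j in range(len(top)):
--         if x <= top[j]:
--             return top[:j] + [x] + top[j:]
--     return top + [x]
--
--
-- def solution(array, commands):
--     answer = []
--     for c in commands:
--         k = c[2]
--         top = []
--         for x in array[c[0]-1:c[1]]: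
--             if len(top) < k:
--                 top = _insort(top, x)
--             elif x < top[-1]:
--                 top = _insort(top[:-1], x)
--         answer.append(top[k-1])
--     return answer
-- ===== Notes on version B (the rewrite author's own statement) =====
-- stated objective: alternative
-- what changed: B replaces sort-the-whole-slice-then-index by a one-pass bounded selection: it scans the slice once keeping only the k smallest elements in a sorted buffer (insert when the buffer has room, otherwise replace the current k-th smallest when beaten) and returns the buffer's last element, never sorting the full slice.
-- outside the precondition, e.g. on solution([1, 2, 3], [[1, 3, 0]]): A returns [3], B raises IndexError
import Mathlib
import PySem

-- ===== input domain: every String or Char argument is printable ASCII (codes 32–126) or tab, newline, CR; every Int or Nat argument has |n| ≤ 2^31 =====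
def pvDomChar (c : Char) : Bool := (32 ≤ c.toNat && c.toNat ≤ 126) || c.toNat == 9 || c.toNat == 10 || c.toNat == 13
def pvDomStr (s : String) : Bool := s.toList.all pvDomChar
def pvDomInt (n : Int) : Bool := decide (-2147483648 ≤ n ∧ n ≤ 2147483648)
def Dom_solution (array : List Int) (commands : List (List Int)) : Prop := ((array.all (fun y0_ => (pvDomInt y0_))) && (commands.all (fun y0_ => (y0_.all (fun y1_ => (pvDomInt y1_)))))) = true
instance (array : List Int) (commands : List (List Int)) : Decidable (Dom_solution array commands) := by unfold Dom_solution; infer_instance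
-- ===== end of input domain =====

-- B replaces full-sort-then-index per command by a one-pass bounded selection of the k smallest; equivalence is proved on commands with 3 entries and 1 ≤ k ≤ slice length.

-- ===== PORT A =====
def solution (array : List Int) (commands : List (List Int)) : List Int :=
  commands.foldl (fun answer i =>
    let list1 := PySem.List.slice array (some (PySem.List.pyGetD i 0 0 - 1)) (some (PySem.List.pyGetD i 1 0))
    let sorted1 := PySem.List.sorted list1 (fun x => x) false
    answer ++ [PySem.List.pyGetD sorted1 (PySem.List.pyGetD i 2 0 - 1) 0]) []

-- ===== PORT B =====
-- port of Source B's _insort: insert x before the first element ≥ x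
def bIns (x : Int) : List Int → List Int
  | [] => [x]
  | b :: l => if x ≤ b then x :: b :: l else b :: bIns x l

-- port of Source B's inner-loop body
def bStep (k : Int) (top : List Int) (x : Int) : List Int :=
  if (top.length : Int) < k then bIns x top
  else if x < PySem.List.pyGetD top (-1) 0 then bIns x (PySem.List.slice top none (some (-1)))
  else top

def solution_alt (array : List Int) (commands : List (List Int)) : List Int :=
  commands.foldl (fun answer c =>
    let k := PySem.List.pyGetD c 2 0
    let top := (PySem.List.slice array (some (PySem.List.pyGetD c 0 0 - 1)) (some (PySem.List.pyGetD c 1 0))).foldl (bStep k) []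
    answer ++ [PySem.List.pyGetD top (k - 1) 0]) []

-- ===== PRECONDITION & SPEC =====
-- Pre_ excludes commands with fewer than 3 entries or with k outside 1..len(slice): there A raises IndexError, except for non-positive k still within negative-indexing range, where A's value is an accident of Python's negative-index wraparound into the sorted slice and B's selection raises IndexError.
def Pre_solution (array : List Int) (commands : List (List Int)) : Prop :=
  ∀ c ∈ commands, 3 ≤ c.length ∧ 1 ≤ PySem.List.pyGetD c 2 0 ∧
    PySem.List.pyGetD c 2 0 ≤ ((PySem.List.slice array (some (PySem.List.pyGetD c 0 0 - 1)) (some (PySem.List.pyGetD c 1 0))).length : Int)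
instance (array : List Int) (commands : List (List Int)) : Decidable (Pre_solution array commands) := by unfold Pre_solution; infer_instance

def pvWitness_solution : List Int × List (List Int) := ([1, 5, 2, 6, 3, 7, 4], [[2, 5, 3], [4, 4, 1], [1, 7, 3]])

def Spec_solution (array : List Int) (commands : List (List Int)) (out : List Int) : Prop := out = solution_alt array commands
instance (array : List Int) (commands : List (List Int)) (out : List Int) : Decidable (Spec_solution array commands out) := by unfold Spec_solution; infer_instance

-- ===== CLAIM (what is proved, stated in full; the proofs are below) =====
def Claim_equal_solution : Prop := ∀ (array : List Int) (commands : List (List Int)), Dom_solution array commands → Pre_solution array commands → Spec_solution array commands (solution array commands)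

-- ===== LEMMAS AND PROOFS =====

theorem length_bIns (x : Int) (l : List Int) : (bIns x l).length = l.length + 1 := by
  induction l with
  | nil => rfl
  | cons b l ih => simp only [bIns]; split <;> simp [ih]

theorem bIns_perm (x : Int) (l : List Int) : (bIns x l).Perm (x :: l) := by
  induction l with
  | nil => rfl
  | cons b l ih =>
    simp only [bIns]; split
    · rfl
    · exact (ih.cons b).trans (List.Perm.swap x b l)

theorem bIns_pairwise (x : Int) (l : List Int) (h : l.Pairwise (· ≤ ·)) :
    (bIns x l).Pairwise (· ≤ ·) := by
  induction l with
  | nil => simp [bIns]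
  | cons b l ih =>
    rcases List.pairwise_cons.mp h with ⟨hb, hl⟩
    simp only [bIns]; split
    · rename_i hxb
      refine List.pairwise_cons.mpr ⟨?_, h⟩
      intro y hy
      rcases List.mem_cons.mp hy with rfl | hy'
      · exact hxb
      · exact le_trans hxb (hb _ hy')
    · rename_i hxb
      refine List.pairwise_cons.mpr ⟨?_, ih hl⟩
      intro y hy
      rcases List.mem_cons.mp ((bIns_perm x l).mem_iff.mp hy) with rfl | hy'
      · omega
      · exact hb _ hy'

theorem bIns_decomp (x : Int) (t : List Int) :
    bIns x t = t.take ((t.takeWhile (fun b => decide (b < x))).length) ++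
      x :: t.drop ((t.takeWhile (fun b => decide (b < x))).length) := by
  induction t with
  | nil => rfl
  | cons b l ih =>
    simp only [bIns, List.takeWhile_cons]
    by_cases hb : b < x
    · simp only [hb, decide_true, if_true, List.length_cons, List.take_succ_cons,
        List.drop_succ_cons, if_neg (by omega : ¬ x ≤ b), List.cons_append, ih]
    · simp [hb, (by omega : x ≤ b)]

theorem takeWhile_stop (q : Int → Bool) (t : List Int)
    (h : (t.takeWhile q).length < t.length) :
    ¬ q (t[(t.takeWhile q).length]) = true := by
  induction t with
  | nil => simp at h
  | cons b l ih =>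
    by_cases hb : q b
    · simpa [List.takeWhile_cons, hb] using ih (by simpa [List.takeWhile_cons, hb] using h)
    · simpa [List.takeWhile_cons, hb]

theorem takeWhile_lt (q : Int → Bool) (t : List Int) (j : Nat)
    (hj : j < (t.takeWhile q).length) :
    q (t[j]'(by have := (List.takeWhile_prefix (l := t) (p := q)).length_le; omega)) = true := by
  induction t generalizing j with
  | nil => simp at hj
  | cons b l ih =>
    by_cases hb : q b
    · match j with
      | 0 => simpa
      | j+1 =>
        simp only [List.getElem_cons_succ]
        exact ih j (by simpa [List.takeWhile_cons, hb] using hj)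
    · simp [List.takeWhile_cons, hb] at hj

theorem bIns_exists_decomp (x : Int) (t : List Int) :
    ∃ p, p ≤ t.length ∧
      bIns x t = t.take p ++ x :: t.drop p ∧
      (∀ n, p ≤ n → bIns x (t.take n) = t.take p ++ x :: (t.take n).drop p) ∧
      (∀ j (hj : j < t.length), j < p → t[j]'hj < x) ∧
      (∀ (hp : p < t.length), x ≤ t[p]'hp) := by
  refine ⟨(t.takeWhile (fun b => decide (b < x))).length,
    (List.takeWhile_prefix _).length_le, bIns_decomp x t, ?_, ?_, ?_⟩
  · intro n hn
    have hple := (List.takeWhile_prefix (l := t) (p := fun b => decide (b < x))).length_le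
    have hlen : ((t.take n).takeWhile (fun b => decide (b < x))).length =
        (t.takeWhile (fun b => decide (b < x))).length := by
      rw [← List.take_takeWhile, List.length_take]
      omega
    rw [bIns_decomp x (t.take n), hlen, List.take_take]
    congr 2
    omega
  · intro j hj hjp
    have := takeWhile_lt (fun b => decide (b < x)) t j hjp
    simpa using this
  · intro hp
    have hlt := takeWhile_stop (fun b => decide (b < x)) t
      (by omega)
    simp only [decide_eq_true_eq] at hlt
    omega

theorem pairwise_getElem_le (t : List Int) (ht : t.Pairwise (· ≤ ·)) (i j : Nat)
    (hij : i ≤ j) (hj : j < t.length) : t[i]'(by omega) ≤ t[j] := by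
  rcases Nat.lt_or_eq_of_le hij with h | h
  · exact List.pairwise_iff_getElem.mp ht i j (by omega) hj h
  · subst h; exact le_refl _

theorem take_bIns_of_ge (x : Int) (t : List Int) (kn : Nat) (ht : t.Pairwise (· ≤ ·))
    (h1 : 1 ≤ kn) (hkn : kn ≤ t.length) (hx : t[kn-1]'(by omega) ≤ x) :
    (bIns x t).take kn = t.take kn := by
  obtain ⟨p, hple, hdec, _hdecn, hlt, hge⟩ := bIns_exists_decomp x t
  rw [hdec, List.take_append, List.take_take, List.length_take]
  by_cases hc : kn ≤ p
  · rw [show min kn p = kn by omega, show kn - min p t.length = 0 by omega]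
    simp
  · push_neg at hc
    have hxp := hge (by omega)
    have hall : ∀ j (hj : j < t.length), p ≤ j → j < kn → t[j]'hj = x := by
      intro j hj hpj hjkn
      have l1 := pairwise_getElem_le t ht p j hpj hj
      have l2 := pairwise_getElem_le t ht j (kn-1) (by omega) (by omega)
      omega
    rw [show min kn p = p by omega,
        show kn - min p t.length = (kn - p - 1) + 1 by omega, List.take_succ_cons]
    conv_rhs => rw [show kn = p + (kn - p) by omega]
    rw [List.take_add]
    congr 1
    apply List.ext_getElem
    · simp only [List.length_cons, List.length_take, List.length_drop]
      omega
    · intro i hi1 hi2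
      have hikp : i < kn - p := by
        simp only [List.length_take, List.length_drop] at hi2; omega
      match i with
      | 0 =>
        simp only [List.getElem_cons_zero]
        rw [List.getElem_take, List.getElem_drop]
        exact (hall (p + 0) (by omega) (by omega) (by omega)).symm
      | Nat.succ i =>
        simp only [List.getElem_cons_succ]
        rw [List.getElem_take, List.getElem_drop, List.getElem_take, List.getElem_drop]
        rw [hall (p + i) (by omega) (by omega) (by omega),
            hall (p + (i+1)) (by omega) (by omega) (by omega)]

theorem take_bIns_of_lt (x : Int) (t : List Int) (kn : Nat) (h1 : 1 ≤ kn)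
    (hkn : kn ≤ t.length) (hx : x < t[kn-1]'(by omega)) :
    (bIns x t).take kn = bIns x (t.take (kn-1)) := by
  obtain ⟨p, hple, hdec, hdecn, hlt, _hge⟩ := bIns_exists_decomp x t
  have hpk : p ≤ kn - 1 := by
    by_contra hcon
    push_neg at hcon
    have := hlt (kn-1) (by omega) (by omega)
    omega
  rw [hdecn (kn-1) hpk, hdec, List.take_append, List.take_take, List.length_take]
  rw [show min kn p = p by omega,
      show kn - min p t.length = (kn - p - 1) + 1 by omega, List.take_succ_cons]
  rw [List.drop_take]
  congr 3
  omega

def sortAll (s : List Int) : List Int := s.foldl (fun acc x => bIns x acc) []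

theorem sortAll_step (s : List Int) (x : Int) : sortAll (s ++ [x]) = bIns x (sortAll s) := by
  simp [sortAll, List.foldl_append]

theorem foldl_bIns_perm (s acc : List Int) : (s.foldl (fun a x => bIns x a) acc).Perm (acc ++ s) := by
  induction s generalizing acc with
  | nil => simp
  | cons x s ih =>
    refine (ih (bIns x acc)).trans ?_
    refine (((bIns_perm x acc).append_right s).trans ?_)
    simpa using List.perm_middle.symm

theorem sortAll_perm (s : List Int) : (sortAll s).Perm s := foldl_bIns_perm s []

theorem foldl_bIns_pairwise (s acc : List Int) (h : acc.Pairwise (· ≤ ·)) :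
    (s.foldl (fun a x => bIns x a) acc).Pairwise (· ≤ ·) := by
  induction s generalizing acc with
  | nil => simpa
  | cons x s ih => exact ih _ (bIns_pairwise x acc h)

theorem sortAll_pairwise (s : List Int) : (sortAll s).Pairwise (· ≤ ·) :=
  foldl_bIns_pairwise s [] (by simp)

theorem sorted_eq_sortAll (s : List Int) :
    PySem.List.sorted s (fun x => x) false = sortAll s :=
  PySem.List.sorted_id_eq_of_perm_of_pairwise s (sortAll s) (sortAll_perm s) (sortAll_pairwise s)

theorem length_sortAll (s : List Int) : (sortAll s).length = s.length :=
  (sortAll_perm s).length_eq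

theorem fold_eq_take (s : List Int) (k : Int) (h1 : 1 ≤ k) :
    s.foldl (bStep k) [] = (sortAll s).take k.toNat := by
  induction s using List.reverseRecOn with
  | nil => simp [sortAll]
  | append_singleton p x ih =>
    rw [List.foldl_append, List.foldl_cons, List.foldl_nil, ih, sortAll_step]
    have ht : (sortAll p).Pairwise (· ≤ ·) := sortAll_pairwise p
    have h1n : 1 ≤ k.toNat := by omega
    rw [bStep]
    by_cases hlen : (sortAll p).length < k.toNat
    · have hcond : (((sortAll p).take k.toNat).length : Int) < k := by
        rw [List.length_take]; omega
      rw [if_pos hcond, List.take_of_length_le (by omega),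
          List.take_of_length_le (by rw [length_bIns]; omega)]
    · push_neg at hlen
      have hcond : ¬ ((((sortAll p).take k.toNat).length : Int) < k) := by
        rw [List.length_take]; omega
      rw [if_neg hcond]
      have hne : (sortAll p).take k.toNat ≠ [] := by
        intro hnil
        have := congrArg List.length hnil
        simp only [List.length_take, List.length_nil] at this
        omega
      rw [PySem.List.pyGetD_neg_one _ _ hne, List.getLast_eq_getElem hne]
      have hlast : ((sortAll p).take k.toNat)[((sortAll p).take k.toNat).length - 1]'(by omega) =
          (sortAll p)[k.toNat - 1]'(by omega) := by
        have hl : ((sortAll p).take k.toNat).length = k.toNat := by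
          rw [List.length_take]; omega
        simp only [hl]
        exact List.getElem_take
      rw [hlast]
      by_cases hxc : x < (sortAll p)[k.toNat - 1]'(by omega)
      · rw [if_pos hxc, PySem.List.slice_to_neg_one]
        have hdl : ((sortAll p).take k.toNat).dropLast = (sortAll p).take (k.toNat - 1) := by
          rw [List.dropLast_eq_take, List.length_take, List.take_take]
          congr 1
          omega
        rw [hdl]
        exact (take_bIns_of_lt x (sortAll p) k.toNat h1n hlen hxc).symm
      · rw [if_neg hxc]
        push_neg at hxc
        exact (take_bIns_of_ge x (sortAll p) k.toNat ht h1n hlen hxc).symm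

theorem cmd_eq (s : List Int) (k : Int) (h1 : 1 ≤ k) (h2 : k ≤ (s.length : Int)) :
    PySem.List.pyGetD (PySem.List.sorted s (fun x => x) false) (k-1) 0 =
    PySem.List.pyGetD (s.foldl (bStep k) []) (k-1) 0 := by
  rw [fold_eq_take s k h1, sorted_eq_sortAll]
  have hlen : (sortAll s).length = s.length := length_sortAll s
  have htl : ((sortAll s).take k.toNat).length = k.toNat := by
    rw [List.length_take]; omega
  rw [PySem.List.pyGetD_eq_getElem _ _ (by omega) (by omega),
      PySem.List.pyGetD_eq_getElem _ _ (by omega) (by rw [htl]; omega)]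
  exact (List.getElem_take).symm

-- ===== VERDICT (by name: the statement is the Claim_ definition above) =====
theorem solution_spec : Claim_equal_solution := by
  intro array commands _hdom hpre
  unfold Spec_solution solution solution_alt
  rw [PySem.List.foldl_append_singleton_eq_map, PySem.List.foldl_append_singleton_eq_map]
  apply List.map_congr_left
  intro c hc
  rcases hpre c hc with ⟨_hlen, hk1, hk2⟩
  exact cmd_eq _ _ hk1 hk2
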